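-- pv_equiv track=rewrite | github.com/Emre45120/Sae-crypto | decryptage.py | get_occurence_des_dicts
-- ===== SOURCE A (Python) =====
-- def get_occurence_des_dicts(text:str) -> "dict[int, int]":
--     """ Retourne un dictionnaire contenant le nombre d'occurence de chaque lettre
--
--     Args:
--         text (str): Le texte à analyser
--
--     Returns:
--         dict[int, int]: Le dictionnaire contenant le nombre d'occurence de chaque lettre
--     """
--     occurences = dict()
--
--     for lettre in text:
--         ascii_char = ord(lettre)
--         if ascii_char in occurences:
--             occurences[ascii_char] += 1
--         else:
--             occurences[ascii_char] = 1
--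
--     for elem in occurences:
--         (occurences[elem] * 100 / len(text))
--     return occurences
-- ===== SOURCE B (Python) =====
-- def get_occurence_des_dicts(text: str) -> "dict[int, int]":
--     """Retourne un dictionnaire contenant le nombre d'occurence de chaque lettre."""
--     ords = [ord(c) for c in text]
--     return {o: ords.count(o) for o in dict.fromkeys(ords)}
-- ===== Notes on version B (the rewrite author's own statement) =====
-- stated objective: simpler
-- what changed: Replaces the single-pass mutable-dict counting loop (plus a dead percentage loop) with a two-phase comprehension: dedup the ordinals in first-occurrence order with dict.fromkeys, then count each distinct ordinal with list.count.
import Mathlib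
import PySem

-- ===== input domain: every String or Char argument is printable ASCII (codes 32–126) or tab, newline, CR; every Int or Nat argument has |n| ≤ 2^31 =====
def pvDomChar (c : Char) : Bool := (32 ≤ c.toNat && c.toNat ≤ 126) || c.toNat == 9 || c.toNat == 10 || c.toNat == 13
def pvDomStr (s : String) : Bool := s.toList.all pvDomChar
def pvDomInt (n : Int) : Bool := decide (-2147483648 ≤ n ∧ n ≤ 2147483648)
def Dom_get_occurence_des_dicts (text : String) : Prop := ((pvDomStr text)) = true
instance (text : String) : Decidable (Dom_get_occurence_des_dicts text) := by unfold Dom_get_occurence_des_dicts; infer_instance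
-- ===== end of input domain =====

-- B replaces A's single-pass mutable-dict counting loop (and A's dead percentage loop)
-- by dedup-then-count: distinct ordinals in first-occurrence order, each paired with its count.


-- ===== PORT A =====
-- Transliteration of A: fold the counting loop over the characters (contains-branch as written).
-- A's second loop only evaluates and discards a pure expression (a percentage); it never
-- changes the dict and cannot raise (it runs only when the dict — hence text — is non-empty),
-- so it is ported as a no-op.
def get_occurence_des_dicts (text : String) : List (Int × Int) :=
  let occurences : PySem.Dict Int Int :=
    text.toList.foldl
      (fun d lettre =>
        let ascii_char : Int := (lettre.toNat : Int)
        if d.contains ascii_char then d.insert ascii_char (d.getD ascii_char 0 + 1)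
        else d.insert ascii_char 1)
      PySem.Dict.empty
  occurences.items

-- ===== PORT B =====
def get_occurence_des_dicts_alt (text : String) : List (Int × Int) :=
  let ords : List Int := text.toList.map (fun c => (c.toNat : Int))
  (PySem.List.dedup ords).map (fun o => (o, (List.count o ords : Int)))

-- ===== PRECONDITION & SPEC =====
def Spec_get_occurence_des_dicts (text : String) (out : List (Int × Int)) : Prop := out = get_occurence_des_dicts_alt text
instance (text : String) (out : List (Int × Int)) : Decidable (Spec_get_occurence_des_dicts text out) := by unfold Spec_get_occurence_des_dicts; infer_instance

-- ===== CLAIM (what is proved, stated in full; the proofs are below) =====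
def Claim_equal_get_occurence_des_dicts : Prop := ∀ (text : String), Dom_get_occurence_des_dicts text → Spec_get_occurence_des_dicts text (get_occurence_des_dicts text)

-- ===== LEMMAS AND PROOFS =====

-- A's branched loop body is the unconditional 'insert x (getD x 0 + 1)':
-- when the key is absent, getD returns the default 0.
theorem pv_step_eq {d : PySem.Dict Int Int} {x : Int} :
    (if d.contains x then d.insert x (d.getD x 0 + 1) else d.insert x 1)
      = d.insert x (d.getD x 0 + 1) := by
  by_cases h : d.contains x = true
  · simp [h]
  · simp only [Bool.not_eq_true] at h
    simp [h, PySem.Dict.getD_of_not_contains d 0 h]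

theorem get_occurence_des_dicts_spec : Claim_equal_get_occurence_des_dicts := by
  intro text _
  show get_occurence_des_dicts text = get_occurence_des_dicts_alt text
  unfold get_occurence_des_dicts get_occurence_des_dicts_alt
  have hfold :
      text.toList.foldl
        (fun d lettre =>
          let ascii_char : Int := (lettre.toNat : Int)
          if d.contains ascii_char then d.insert ascii_char (d.getD ascii_char 0 + 1)
          else d.insert ascii_char 1)
        PySem.Dict.empty
        = PySem.Dict.counter (text.toList.map (fun c => (c.toNat : Int))) := by
    rw [← PySem.Dict.foldl_insert_getD_add_one_eq_counter, List.foldl_map]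
    exact PySem.List.foldl_congr_mem _ _ _ _ (fun d x _ => pv_step_eq)
  simp only [hfold, PySem.Dict.items_counter, PySem.List.dedup_eq_ofList]
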